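-- pv_equiv track=rewrite | github.com/pypi-data/pypi-mirror-345 | packages/test-saral-auto/test_saral_auto-0.1.0.tar.gz/test_saral_auto-0.1.0/core/transformers/detect_shapes/detect_shapes.py | group_and_sort_circles
-- ===== SOURCE A (Python) =====
-- def group_and_sort_circles(circles):
--     # First, sort the circles based on y-coordinate
--     if not circles:
--         return []
--     circles_sorted = sorted(circles, key=lambda c: c[1])
--
--     # Now, iterate through the sorted list and group circles with similar y-coordinates
--     grouped_circles = []
--     current_group = [circles_sorted[0]]
--     for i in range(1, len(circles_sorted)):
--         if abs(circles_sorted[i][1] - circles_sorted[i - 1][1]) <= 8: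
--             current_group.append(circles_sorted[i])
--         else:
--             grouped_circles.extend(sorted(current_group, key=lambda c: c[0]))
--             current_group = [circles_sorted[i]]
--     grouped_circles.extend(sorted(current_group, key=lambda c: c[0]))
--
--     return grouped_circles
-- ===== SOURCE B (Python) =====
-- def group_and_sort_circles(circles):
--     # Label-and-sort: assign each circle a group id in one pass over the
--     # y-sorted list, then a SINGLE stable sort by the composite key (gid, x)
--     # replaces all per-group sorting; no group lists are ever built.
--     by_y = sorted(circles, key=lambda c: c[1])
--     keyed = []
--     gid = 0
--     for i, c in enumerate(by_y):
--         if i > 0 and abs(c[1] - by_y[i - 1][1]) > 8: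
--             gid += 1
--         keyed.append((gid, c))
--     keyed.sort(key=lambda t: (t[0], t[1][0]))
--     return [c for _, c in keyed]
-- ===== Notes on version B (the rewrite author's own statement) =====
-- stated objective: alternative
-- what changed: Replaces A's group-then-sort-each-group loop (building group lists and sorting each by x) with label-and-sort: one pass over the y-sorted list assigns each circle a group id, then a single stable sort by the composite key (gid, x) produces the whole output at once; no group lists and no per-group sorts exist in B.
import Mathlib
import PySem

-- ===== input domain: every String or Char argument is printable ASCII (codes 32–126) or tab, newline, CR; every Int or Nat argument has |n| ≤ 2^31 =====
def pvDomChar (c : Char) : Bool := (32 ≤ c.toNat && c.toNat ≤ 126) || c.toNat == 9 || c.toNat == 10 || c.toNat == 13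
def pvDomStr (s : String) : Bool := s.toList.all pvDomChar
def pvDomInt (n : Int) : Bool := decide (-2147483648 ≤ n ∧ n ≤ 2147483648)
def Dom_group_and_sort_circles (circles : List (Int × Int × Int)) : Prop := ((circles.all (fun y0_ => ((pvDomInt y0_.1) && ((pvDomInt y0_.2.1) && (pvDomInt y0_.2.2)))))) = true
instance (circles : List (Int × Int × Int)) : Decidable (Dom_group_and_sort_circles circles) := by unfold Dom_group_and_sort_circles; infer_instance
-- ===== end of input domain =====

-- B replaces A's group-then-sort-each-group loop by label-and-sort: one pass over the
-- y-sorted list assigns a group id to every circle, then a SINGLE stable sort by the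
-- composite key (gid, x) orders everything at once; no group lists are ever built.

-- ===== PORT A =====
def group_and_sort_circles (circles : List (Int × Int × Int)) : List (Int × Int × Int) :=
  if circles = [] then []
  else
    let cs := PySem.List.sorted circles (fun c => c.2.1) false
    let st := (PySem.List.pyRange 1 (PySem.List.len cs) 1).foldl
      (fun (st : List (Int × Int × Int) × List (Int × Int × Int)) i =>
        if |(PySem.List.pyGetD cs i (0,0,0)).2.1 - (PySem.List.pyGetD cs (i-1) (0,0,0)).2.1| ≤ 8
        then (st.1, st.2 ++ [PySem.List.pyGetD cs i (0,0,0)])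
        else (st.1 ++ PySem.List.sorted st.2 (fun c => c.1) false, [PySem.List.pyGetD cs i (0,0,0)]))
      ([], [PySem.List.pyGetD cs 0 (0,0,0)])
    st.1 ++ PySem.List.sorted st.2 (fun c => c.1) false

-- ===== PORT B =====
def group_and_sort_circles_alt (circles : List (Int × Int × Int)) : List (Int × Int × Int) :=
  let by_y := PySem.List.sorted circles (fun c => c.2.1) false
  let st := (PySem.List.enumerate by_y).foldl
    (fun (st : List (Int × (Int × Int × Int)) × Int) ic =>
      let gid := if ic.1 > 0 ∧ |ic.2.2.1 - (PySem.List.pyGetD by_y (ic.1 - 1) (0,0,0)).2.1| > 8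
                 then st.2 + 1 else st.2
      (st.1 ++ [(gid, ic.2)], gid))
    ([], 0)
  (PySem.List.sorted2 st.1 (fun t => t.1) (fun t => t.2.1) false).map (fun t => t.2)

-- ===== PRECONDITION & SPEC =====
def Spec_group_and_sort_circles (circles : List (Int × Int × Int)) (out : List (Int × Int × Int)) : Prop := out = group_and_sort_circles_alt circles
instance (circles : List (Int × Int × Int)) (out : List (Int × Int × Int)) : Decidable (Spec_group_and_sort_circles circles out) := by unfold Spec_group_and_sort_circles; infer_instance

-- ===== CLAIM (what is proved, stated in full; the proofs are below) =====
def Claim_equal_group_and_sort_circles : Prop := ∀ (circles : List (Int × Int × Int)), Dom_group_and_sort_circles circles → Spec_group_and_sort_circles circles (group_and_sort_circles circles)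

-- ===== LEMMAS AND PROOFS =====

-- proof helpers (definitionally equal to the ports' loop bodies)
def sortX (g : List (Int × Int × Int)) : List (Int × Int × Int) :=
  PySem.List.sorted g (fun c => c.1) false

def bodyA (cs : List (Int × Int × Int))
    (st : List (Int × Int × Int) × List (Int × Int × Int)) (i : Int) :
    List (Int × Int × Int) × List (Int × Int × Int) :=
  if |(PySem.List.pyGetD cs i (0,0,0)).2.1 - (PySem.List.pyGetD cs (i-1) (0,0,0)).2.1| ≤ 8
  then (st.1, st.2 ++ [PySem.List.pyGetD cs i (0,0,0)])
  else (st.1 ++ sortX st.2, [PySem.List.pyGetD cs i (0,0,0)])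

def stepA (st : List (Int × Int × Int) × List (Int × Int × Int))
    (prev c : Int × Int × Int) : List (Int × Int × Int) × List (Int × Int × Int) :=
  if |c.2.1 - prev.2.1| ≤ 8 then (st.1, st.2 ++ [c]) else (st.1 ++ sortX st.2, [c])

def loopA (prev : Int × Int × Int)
    (st : List (Int × Int × Int) × List (Int × Int × Int)) :
    List (Int × Int × Int) → List (Int × Int × Int) × List (Int × Int × Int)
  | [] => st
  | c :: rest => loopA c (stepA st prev c) rest

def stepB (groups : List (List (Int × Int × Int))) (c : Int × Int × Int) :
    List (List (Int × Int × Int)) :=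
  if groups ≠ [] ∧ |c.2.1 - (PySem.List.pyGetD (PySem.List.pyGetD groups (-1) []) (-1) (0,0,0)).2.1| ≤ 8
  then groups.dropLast ++ [PySem.List.pyGetD groups (-1) [] ++ [c]]
  else groups ++ [[c]]

-- the index loop of A is the structural loop loopA over the suffix after position k
lemma foldA_loopA (cs : List (Int × Int × Int)) :
    ∀ (n k : Nat) (st : List (Int × Int × Int) × List (Int × Int × Int)),
    cs.length = k + 1 + n →
    (PySem.List.pyRange ((k : Int) + 1) (cs.length : Int) 1).foldl (bodyA cs) st
      = loopA (cs.getD k (0,0,0)) st (cs.drop (k+1)) := by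
  intro n
  induction n with
  | zero =>
    intro k st hlen
    rw [PySem.List.pyRange_one_eq_nil (by omega)]
    rw [List.drop_eq_nil_of_le (by omega)]
    rfl
  | succ n ih =>
    intro k st hlen
    have hk1 : k + 1 < cs.length := by omega
    have hk : k < cs.length := by omega
    rw [PySem.List.pyRange_one_cons (by exact_mod_cast by omega : ((k:Int)+1) < (cs.length : Int))]
    rw [List.foldl_cons]
    have hb : bodyA cs st ((k : Int) + 1) = stepA st cs[k] cs[k+1] := by
      unfold bodyA stepA
      have h1 : PySem.List.pyGetD cs ((k : Int) + 1) (0,0,0) = cs[k+1] := by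
        have := PySem.List.pyGetD_eq_getElem (xs := cs) (i := (k : Int) + 1) (d := (0,0,0))
          (by omega) (by exact_mod_cast hk1)
        simpa using this
      have h2 : PySem.List.pyGetD cs ((k : Int) + 1 - 1) (0,0,0) = cs[k] := by
        have := PySem.List.pyGetD_eq_getElem (xs := cs) (i := (k : Int)) (d := (0,0,0))
          (by omega) (by exact_mod_cast hk)
        simpa using this
      rw [h1, h2]
    rw [hb]
    have hdrop : cs.drop (k+1) = cs[k+1] :: cs.drop (k+2) := by
      rw [List.drop_eq_getElem_cons hk1]
    rw [hdrop]
    have : ((k : Int) + 1 + 1) = (((k+1 : Nat) : Int) + 1) := by push_cast; ring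
    rw [this, ih (k+1) (stepA st cs[k] cs[k+1]) (by omega)]
    have hgd : cs.getD k (0,0,0) = cs[k] := List.getD_eq_getElem cs (0,0,0) hk
    have hgd1 : cs.getD (k+1) (0,0,0) = cs[k+1] := List.getD_eq_getElem cs (0,0,0) hk1
    rw [hgd, hgd1]
    rfl

-- main invariant: A's running state mirrors the explicit list of groups built by stepB
lemma main_inv (t : List (Int × Int × Int)) :
    ∀ (prev : Int × Int × Int) (Gs : List (List (Int × Int × Int)))
      (cur : List (Int × Int × Int)), cur.getLast? = some prev →
    (loopA prev ((Gs.map sortX).flatten, cur) t).1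
        ++ sortX (loopA prev ((Gs.map sortX).flatten, cur) t).2
      = ((t.foldl stepB (Gs ++ [cur])).map sortX).flatten := by
  induction t with
  | nil =>
    intro prev Gs cur _
    simp [loopA]
  | cons c t ih =>
    intro prev Gs cur hlast
    have hne : cur ≠ [] := by
      intro h; rw [h] at hlast; simp at hlast
    have hprev : cur.getLast hne = prev := by
      rw [List.getLast?_eq_some_getLast hne] at hlast
      exact Option.some.inj hlast
    have hlast1 : PySem.List.pyGetD (PySem.List.pyGetD (Gs ++ [cur]) (-1) []) (-1) (0,0,0) = prev := by
      rw [PySem.List.pyGetD_neg_one_append_singleton]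
      rw [PySem.List.pyGetD_neg_one (h := hne), hprev]
    show (loopA c (stepA _ prev c) t).1 ++ sortX (loopA c (stepA _ prev c) t).2
        = ((t.foldl stepB (stepB (Gs ++ [cur]) c)).map sortX).flatten
    unfold stepA stepB
    rw [hlast1]
    by_cases hcond : |c.2.1 - prev.2.1| ≤ 8
    · rw [if_pos hcond, if_pos ⟨by simp, hcond⟩]
      rw [PySem.List.pyGetD_neg_one_append_singleton, List.dropLast_concat]
      have := ih c Gs (cur ++ [c]) (by simp)
      simpa using this
    · rw [if_neg hcond, if_neg (by simp [hcond])]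
      have := ih c (Gs ++ [cur]) [c] (by simp)
      simp only [List.map_append, List.flatten_append, List.map_cons, List.map_nil,
        List.flatten_cons, List.flatten_nil, List.append_nil] at this ⊢
      rw [List.append_assoc] at this
      simpa using this

lemma ports_agree (cs : List (Int × Int × Int)) (h : Int × Int × Int)
    (t : List (Int × Int × Int)) (hcs : cs = h :: t) :
    (((PySem.List.pyRange 1 (PySem.List.len cs) 1).foldl (bodyA cs)
        ([], [PySem.List.pyGetD cs 0 (0,0,0)])).1
      ++ sortX ((PySem.List.pyRange 1 (PySem.List.len cs) 1).foldl (bodyA cs)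
        ([], [PySem.List.pyGetD cs 0 (0,0,0)])).2)
    = ((cs.foldl stepB []).map sortX).flatten := by
  have hlen2 : PySem.List.len cs = (cs.length : Int) := PySem.List.len_eq cs
  have hget0 : PySem.List.pyGetD cs 0 (0,0,0) = h := by
    rw [hcs]; exact PySem.List.pyGetD_zero_cons h t (0,0,0)
  have hfold := foldA_loopA cs t.length 0 ([], [h]) (by rw [hcs]; simp [Nat.add_comm])
  simp only [Nat.cast_zero, zero_add] at hfold
  have hd0 : cs.getD 0 (0,0,0) = h := by rw [hcs]; rfl
  have hdrop1 : cs.drop 1 = t := by rw [hcs]; rfl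
  rw [hlen2, hget0, hfold, hd0, hdrop1]
  have hB : cs.foldl stepB [] = t.foldl stepB ([] ++ [[h]]) := by
    rw [hcs, List.foldl_cons]
    have : stepB [] h = [] ++ [[h]] := by unfold stepB; simp
    rw [this]
  rw [hB]
  have := main_inv t h [] [h] (by simp)
  simpa using this

-- ===== B-side helpers =====

def bodyL (cs : List (Int × Int × Int))
    (st : List (Int × (Int × Int × Int)) × Int) (ic : Int × (Int × Int × Int)) :
    List (Int × (Int × Int × Int)) × Int :=
  let gid := if ic.1 > 0 ∧ |ic.2.2.1 - (PySem.List.pyGetD cs (ic.1 - 1) (0,0,0)).2.1| > 8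
             then st.2 + 1 else st.2
  (st.1 ++ [(gid, ic.2)], gid)

def stepL (st : List (Int × (Int × Int × Int)) × Int)
    (prev c : Int × Int × Int) : List (Int × (Int × Int × Int)) × Int :=
  if |c.2.1 - prev.2.1| > 8 then (st.1 ++ [(st.2 + 1, c)], st.2 + 1)
  else (st.1 ++ [(st.2, c)], st.2)

def loopL (prev : Int × Int × Int) (st : List (Int × (Int × Int × Int)) × Int) :
    List (Int × Int × Int) → List (Int × (Int × Int × Int)) × Int
  | [] => st
  | c :: rest => loopL c (stepL st prev c) rest

-- the gid-annotated flattening of an explicit group list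
def encode (g : Int) : List (List (Int × Int × Int)) → List (Int × (Int × Int × Int))
  | [] => []
  | gr :: rest => gr.map (fun c => (g, c)) ++ encode (g+1) rest

-- the two comparison functions behind B's sorts
def ltLex (a b : Int × (Int × Int × Int)) : Bool :=
  decide (a.1 < b.1) || (!decide (b.1 < a.1) && decide (a.2.1 < b.2.1))

def ltX (a b : Int × Int × Int) : Bool := decide (a.1 < b.1)

lemma sorted2_eq_fold (xs : List (Int × (Int × Int × Int))) :
    PySem.List.sorted2 xs (fun t => t.1) (fun t => t.2.1) false
      = xs.foldl (fun acc x => PySem.List.insertBy ltLex x acc) [] := rfl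

lemma sortX_eq_fold (g : List (Int × Int × Int)) :
    sortX g = g.foldl (fun acc x => PySem.List.insertBy ltX x acc) [] :=
  PySem.List.sorted_eq_foldl_insertBy g (fun c => c.1)

-- enumerate-based fold is the structural loop loopL
lemma foldL_loopL (cs : List (Int × Int × Int)) :
    ∀ (t : List (Int × Int × Int)) (k : Nat) (st : List (Int × (Int × Int × Int)) × Int),
    cs.drop (k+1) = t → (k+1) + t.length = cs.length →
    (PySem.List.enumerate t ((k : Int) + 1)).foldl (bodyL cs) st
      = loopL (cs.getD k (0,0,0)) st t := by
  intro t
  induction t with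
  | nil => intro k st _ _; rfl
  | cons c rest ih =>
    intro k st hdrop hlen
    have hk1 : k + 1 < cs.length := by
      have := congrArg List.length hdrop
      simp [List.length_drop] at this
      omega
    have hk : k < cs.length := by omega
    have hc : cs[k+1] = c := by
      have : cs.drop (k+1) = cs[k+1] :: cs.drop (k+2) := List.drop_eq_getElem_cons hk1
      rw [hdrop] at this
      exact (List.cons.injEq _ _ _ _ ▸ this).1.symm
    have hrest : cs.drop (k+2) = rest := by
      have : cs.drop (k+1) = cs[k+1] :: cs.drop (k+2) := List.drop_eq_getElem_cons hk1
      rw [hdrop, hc] at this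
      exact ((List.cons.injEq _ _ _ _ ▸ this).2).symm
    show (PySem.List.enumerate (c :: rest) ((k : Int) + 1)).foldl (bodyL cs) st = _
    have henum : PySem.List.enumerate (c :: rest) ((k : Int) + 1)
        = ((k : Int) + 1, c) :: PySem.List.enumerate rest ((k : Int) + 1 + 1) := by
      simp [PySem.List.enumerate]
    rw [henum, List.foldl_cons]
    have hb : bodyL cs st ((k : Int) + 1, c) = stepL st (cs.getD k (0,0,0)) c := by
      unfold bodyL stepL
      have h2 : PySem.List.pyGetD cs ((k : Int) + 1 - 1) (0,0,0) = cs[k] := by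
        have := PySem.List.pyGetD_eq_getElem (xs := cs) (i := (k : Int)) (d := (0,0,0))
          (by omega) (by exact_mod_cast hk)
        simpa using this
      have hgd : cs.getD k (0,0,0) = cs[k] := List.getD_eq_getElem cs (0,0,0) hk
      simp only [h2, hgd]
      by_cases hcond : |c.2.1 - cs[k].2.1| > 8
      · rw [if_pos ⟨by positivity, hcond⟩, if_pos hcond]
      · rw [if_neg (by tauto), if_neg hcond]
    rw [hb]
    have hcast : ((k : Int) + 1 + 1) = (((k+1 : Nat) : Int) + 1) := by push_cast; ring
    rw [hcast, ih (k+1) _ hrest (by simp only [List.length_cons] at hlen; omega)]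
    have hgd1 : cs.getD (k+1) (0,0,0) = cs[k+1] := List.getD_eq_getElem cs (0,0,0) hk1
    rw [hgd1, hc]
    rfl

lemma encode_snoc (gr : List (Int × Int × Int)) :
    ∀ (Gs : List (List (Int × Int × Int))) (g : Int),
    encode g (Gs ++ [gr]) = encode g Gs ++ gr.map (fun c => (g + (Gs.length : Int), c)) := by
  intro Gs
  induction Gs with
  | nil => intro g; simp [encode]
  | cons G Gs ih =>
    intro g
    show G.map (fun c => (g, c)) ++ encode (g+1) (Gs ++ [gr]) = _
    rw [ih (g+1)]
    show _ = (G.map (fun c => (g, c)) ++ encode (g+1) Gs) ++ _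
    rw [List.append_assoc]
    congr 2
    refine List.map_congr_left fun c _ => ?_
    congr 1
    simp only [List.length_cons]
    push_cast
    ring

-- labelling invariant: the label loop writes down exactly the gid-annotation of stepB's groups
lemma label_inv (t : List (Int × Int × Int)) :
    ∀ (prev : Int × Int × Int) (Gs : List (List (Int × Int × Int)))
      (cur : List (Int × Int × Int)), cur.getLast? = some prev →
    (loopL prev (encode 0 (Gs ++ [cur]), (Gs.length : Int)) t).1
      = encode 0 (t.foldl stepB (Gs ++ [cur])) := by
  induction t with
  | nil => intro prev Gs cur _; rfl
  | cons c t ih =>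
    intro prev Gs cur hlast
    have hne : cur ≠ [] := by intro h; rw [h] at hlast; simp at hlast
    have hprev : cur.getLast hne = prev := by
      rw [List.getLast?_eq_some_getLast hne] at hlast
      exact Option.some.inj hlast
    have hlast1 : PySem.List.pyGetD (PySem.List.pyGetD (Gs ++ [cur]) (-1) []) (-1) (0,0,0) = prev := by
      rw [PySem.List.pyGetD_neg_one_append_singleton]
      rw [PySem.List.pyGetD_neg_one (h := hne), hprev]
    show (loopL c (stepL _ prev c) t).1 = encode 0 (t.foldl stepB (stepB (Gs ++ [cur]) c))
    unfold stepL stepB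
    rw [hlast1]
    by_cases hcond : |c.2.1 - prev.2.1| > 8
    · rw [if_pos hcond, if_neg (by omega)]
      have hstate : encode 0 ((Gs ++ [cur]) ++ [[c]])
          = encode 0 (Gs ++ [cur]) ++ [((Gs.length : Int) + 1, c)] := by
        rw [encode_snoc [c] (Gs ++ [cur]) 0]
        simp
      have hlen2 : ((Gs.length : Int) + 1) = (((Gs ++ [cur]).length : Nat) : Int) := by simp
      rw [← hstate, hlen2]
      exact ih c (Gs ++ [cur]) [c] (by simp)
    · rw [if_neg hcond, if_pos ⟨by simp, by omega⟩]
      rw [PySem.List.pyGetD_neg_one_append_singleton, List.dropLast_concat]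
      have hstate : encode 0 (Gs ++ [cur ++ [c]])
          = encode 0 (Gs ++ [cur]) ++ [((Gs.length : Int), c)] := by
        rw [encode_snoc (cur ++ [c]) Gs 0, encode_snoc cur Gs 0]
        simp
      rw [← hstate]
      exact ih c Gs (cur ++ [c]) (by simp)

-- insertBy passes unchanged through a prefix it is not 'before' any element of
lemma insertBy_pass (b : Int × (Int × Int × Int)) :
    ∀ (σ acc : List (Int × (Int × Int × Int))), (∀ a ∈ σ, ltLex b a = false) →
    PySem.List.insertBy ltLex b (σ ++ acc) = σ ++ PySem.List.insertBy ltLex b acc := by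
  intro σ
  induction σ with
  | nil => intro acc _; rfl
  | cons a σ ih =>
    intro acc h
    have ha : ltLex b a = false := h a (by simp)
    show PySem.List.insertBy ltLex b (a :: (σ ++ acc)) = a :: (σ ++ PySem.List.insertBy ltLex b acc)
    rw [show PySem.List.insertBy ltLex b (a :: (σ ++ acc))
          = if ltLex b a then b :: a :: (σ ++ acc) else a :: PySem.List.insertBy ltLex b (σ ++ acc)
        from by simp [PySem.List.insertBy]]
    rw [ha]
    simp only [Bool.false_eq_true, if_false]
    rw [ih acc (fun x hx => h x (by simp [hx]))]

lemma fold_pass (σ : List (Int × (Int × Int × Int))) :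
    ∀ (bs acc : List (Int × (Int × Int × Int))), (∀ b ∈ bs, ∀ a ∈ σ, ltLex b a = false) →
    bs.foldl (fun acc x => PySem.List.insertBy ltLex x acc) (σ ++ acc)
      = σ ++ bs.foldl (fun acc x => PySem.List.insertBy ltLex x acc) acc := by
  intro bs
  induction bs with
  | nil => intro acc _; rfl
  | cons b bs ih =>
    intro acc h
    simp only [List.foldl_cons]
    rw [insertBy_pass b σ acc (h b (by simp))]
    exact ih _ (fun x hx => h x (by simp [hx]))

-- a stable composite-key sort of a low-gid block followed by higher-gid elements splits
lemma sorted2_split (as bs : List (Int × (Int × Int × Int)))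
    (h : ∀ a ∈ as, ∀ b ∈ bs, a.1 < b.1) :
    PySem.List.sorted2 (as ++ bs) (fun t => t.1) (fun t => t.2.1) false
      = PySem.List.sorted2 as (fun t => t.1) (fun t => t.2.1) false
        ++ PySem.List.sorted2 bs (fun t => t.1) (fun t => t.2.1) false := by
  rw [sorted2_eq_fold, sorted2_eq_fold, sorted2_eq_fold, List.foldl_append]
  have hmem : ∀ a ∈ as.foldl (fun acc x => PySem.List.insertBy ltLex x acc) [], a ∈ as := by
    intro a ha
    have hperm : (PySem.List.sorted2 as (fun t => t.1) (fun t => t.2.1) false).Perm as :=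
      PySem.List.sorted2_perm as (fun t => t.1) (fun t => t.2.1) false
    rw [sorted2_eq_fold] at hperm
    exact hperm.mem_iff.mp ha
  have := fold_pass (as.foldl (fun acc x => PySem.List.insertBy ltLex x acc) []) bs []
    (fun b hb a ha => by
      have hlt : a.1 < b.1 := h a (hmem a ha) b hb
      unfold ltLex
      simp only [Bool.or_eq_false_iff, Bool.and_eq_false_iff]
      constructor
      · simp; omega
      · left; simp; omega)
  simpa using this

-- on a constant-gid block the composite-key sort is the x-sort, pair-mapped
lemma insertBy_map (g : Int) (c : Int × Int × Int) :
    ∀ (ys : List (Int × Int × Int)),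
    PySem.List.insertBy ltLex (g, c) (ys.map (fun y => (g, y)))
      = (PySem.List.insertBy ltX c ys).map (fun y => (g, y)) := by
  intro ys
  induction ys with
  | nil => rfl
  | cons y ys ih =>
    have hlex : ltLex (g, c) (g, y) = ltX c y := by
      unfold ltLex ltX
      simp
    show PySem.List.insertBy ltLex (g, c) ((g, y) :: ys.map (fun y => (g, y))) = _
    rw [show PySem.List.insertBy ltLex (g, c) ((g, y) :: ys.map (fun y => (g, y)))
          = if ltLex (g, c) (g, y) then (g, c) :: (g, y) :: ys.map (fun y => (g, y))
            else (g, y) :: PySem.List.insertBy ltLex (g, c) (ys.map (fun y => (g, y)))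
        from by simp [PySem.List.insertBy]]
    rw [show PySem.List.insertBy ltX c (y :: ys)
          = if ltX c y then c :: y :: ys else y :: PySem.List.insertBy ltX c ys
        from by simp [PySem.List.insertBy]]
    rw [hlex]
    by_cases hc : ltX c y = true
    · simp [hc]
    · simp only [Bool.not_eq_true] at hc
      simp [hc, ih]

lemma fold_map (g : Int) :
    ∀ (gr acc : List (Int × Int × Int)),
    (gr.map (fun y => (g, y))).foldl (fun acc x => PySem.List.insertBy ltLex x acc)
        (acc.map (fun y => (g, y)))
      = (gr.foldl (fun acc x => PySem.List.insertBy ltX x acc) acc).map (fun y => (g, y)) := by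
  intro gr
  induction gr with
  | nil => intro acc; rfl
  | cons c gr ih =>
    intro acc
    simp only [List.map_cons, List.foldl_cons]
    rw [insertBy_map g c acc]
    exact ih _

lemma sorted2_const (g : Int) (gr : List (Int × Int × Int)) :
    PySem.List.sorted2 (gr.map (fun y => (g, y))) (fun t => t.1) (fun t => t.2.1) false
      = (sortX gr).map (fun y => (g, y)) := by
  rw [sorted2_eq_fold, sortX_eq_fold]
  have := fold_map g gr []
  simpa using this

lemma encode_fst_lt (gs : List (List (Int × Int × Int))) :
    ∀ (g : Int) (p : Int × (Int × Int × Int)), p ∈ encode g gs → g ≤ p.1 := by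
  induction gs with
  | nil => intro g p hp; simp [encode] at hp
  | cons gr rest ih =>
    intro g p hp
    simp only [encode, List.mem_append, List.mem_map] at hp
    rcases hp with ⟨c, _, rfl⟩ | hp
    · simp
    · have := ih (g+1) p hp
      omega

lemma sorted2_encode (gs : List (List (Int × Int × Int))) :
    ∀ (g : Int),
    (PySem.List.sorted2 (encode g gs) (fun t => t.1) (fun t => t.2.1) false).map (fun t => t.2)
      = (gs.map sortX).flatten := by
  induction gs with
  | nil => intro g; rfl
  | cons gr rest ih =>
    intro g
    show (PySem.List.sorted2 (gr.map (fun c => (g, c)) ++ encode (g+1) rest) _ _ false).map _ = _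
    rw [sorted2_split _ _ (by
      intro a ha b hb
      rcases List.mem_map.mp ha with ⟨c, _, rfl⟩
      have := encode_fst_lt rest (g+1) b hb
      simp only []
      omega)]
    rw [sorted2_const g gr, List.map_append, List.map_map]
    rw [ih (g+1)]
    simp

-- B equals the group-list form too
lemma alt_agree (cs : List (Int × Int × Int)) (h : Int × Int × Int)
    (t : List (Int × Int × Int)) (hcs : cs = h :: t) :
    (PySem.List.sorted2 ((PySem.List.enumerate cs).foldl (bodyL cs) ([], 0)).1
        (fun t => t.1) (fun t => t.2.1) false).map (fun t => t.2)
      = ((cs.foldl stepB []).map sortX).flatten := by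
  have henum : PySem.List.enumerate cs = (0, h) :: PySem.List.enumerate t 1 := by
    rw [hcs]; simp [PySem.List.enumerate]
  have hfirst : bodyL cs ([], 0) (0, h) = ([(0, h)], 0) := by
    unfold bodyL
    rw [if_neg (by simp)]
    rfl
  have hfold := foldL_loopL cs t 0 ([(0, h)], 0) (by rw [hcs]; rfl) (by rw [hcs]; simp [Nat.add_comm])
  simp only [Nat.cast_zero, zero_add] at hfold
  have hd0 : cs.getD 0 (0,0,0) = h := by rw [hcs]; rfl
  rw [henum, List.foldl_cons, hfirst]
  have h1 : (PySem.List.enumerate t ((0 : Int) + 1)).foldl (bodyL cs) ([(0, h)], 0)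
      = loopL h ([(0, h)], 0) t := by
    rw [hd0] at hfold
    simpa using hfold
  have hstate : (([(0, h)], 0) : List (Int × (Int × Int × Int)) × Int)
      = (encode 0 ([] ++ [[h]]), ((0 : Nat) : Int)) := by
    simp [encode]
  have hlabel : (loopL h ([(0, h)], 0) t).1 = encode 0 (t.foldl stepB ([] ++ [[h]])) := by
    rw [hstate]
    exact label_inv t h [] [h] (by simp)
  have hB : cs.foldl stepB [] = t.foldl stepB ([] ++ [[h]]) := by
    rw [hcs, List.foldl_cons]
    have : stepB [] h = [] ++ [[h]] := by unfold stepB; simp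
    rw [this]
  rw [show PySem.List.enumerate t 1 = PySem.List.enumerate t ((0 : Int) + 1) from by norm_num]
  rw [h1, hB, hlabel]
  exact sorted2_encode _ 0

-- ===== VERDICT (by name: the statement is the Claim_ definition above) =====
theorem group_and_sort_circles_spec : Claim_equal_group_and_sort_circles := by
  intro circles _
  unfold Spec_group_and_sort_circles group_and_sort_circles group_and_sort_circles_alt
  by_cases hc : circles = []
  · subst hc; rfl
  · rw [if_neg hc]
    have hne : PySem.List.sorted circles (fun c => c.2.1) false ≠ [] := by
      intro h
      have := PySem.List.length_sorted (xs := circles) (key := fun c => c.2.1) (rev := false)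
      rw [h] at this
      exact hc (List.eq_nil_of_length_eq_zero this.symm)
    obtain ⟨h, t, hcs⟩ := List.exists_cons_of_ne_nil hne
    exact (ports_agree _ h t hcs).trans (alt_agree _ h t hcs).symm
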